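-- pv_equiv track=rewrite | github.com/JLavanya03/Banking-Report-Generator | report.py | detect_account_col
-- ===== SOURCE A (Python) =====
-- from typing import Tuple, Optional, List
--
-- def detect_account_col(cols: List[str]) -> Optional[str]:
--     candidates = ["account number", "account_number", "account", "acct", "acc_number"]
--     for col in cols:
--         if col.strip().lower() in candidates:
--             return col
--     # fuzzy search
--     for col in cols:
--         if "acct" in col.lower() or "account" in col.lower():
--             return col
--     return None
-- ===== SOURCE B (Python) =====
-- from typing import Optional, List
--
-- def detect_account_col(cols: List[str]) -> Optional[str]:
--     candidates = {"account number", "account_number", "account", "acct", "acc_number"}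
--     fuzzy = None
--     for col in cols:
--         if col.strip().lower() in candidates:
--             return col
--         if fuzzy is None and ("acct" in col.lower() or "account" in col.lower()):
--             fuzzy = col
--     return fuzzy
-- ===== Notes on version B (the rewrite author's own statement) =====
-- stated objective: simpler
-- what changed: Replaces A's two sequential scans (exact loop, then a second full fuzzy loop) by one pass that returns on an exact match and remembers the first fuzzy candidate in a single variable, returned at the end.
import Mathlib
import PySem

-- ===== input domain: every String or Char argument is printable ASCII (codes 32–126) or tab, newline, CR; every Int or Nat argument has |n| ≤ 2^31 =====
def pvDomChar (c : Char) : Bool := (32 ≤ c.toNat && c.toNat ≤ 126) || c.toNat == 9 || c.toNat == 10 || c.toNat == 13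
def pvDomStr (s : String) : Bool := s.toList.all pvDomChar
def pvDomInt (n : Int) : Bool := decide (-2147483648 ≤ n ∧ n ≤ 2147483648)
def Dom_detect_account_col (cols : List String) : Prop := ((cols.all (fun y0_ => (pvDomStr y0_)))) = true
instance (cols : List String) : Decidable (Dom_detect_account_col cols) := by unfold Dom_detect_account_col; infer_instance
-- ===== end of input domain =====

-- B fuses A's two sequential scans into one pass remembering the first fuzzy candidate (objective: simpler).

-- ===== PORT A =====
-- the shared literal tests (`col.strip().lower() in candidates`; `"acct" in col.lower() or "account" in col.lower()`)
def pvCandidates : List String := ["account number", "account_number", "account", "acct", "acc_number"]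
def pvExact (col : String) : Bool := pvCandidates.contains (PySem.Str.lower (PySem.Str.strip col))
def pvFuzzy (col : String) : Bool :=
  PySem.Str.isIn "acct" (PySem.Str.lower col) || PySem.Str.isIn "account" (PySem.Str.lower col)

-- A's first loop: return the first exact match
def pvALoop1 (cols : List String) : Option String :=
  match cols with
  | [] => none
  | col :: rest => if pvExact col then some col else pvALoop1 rest

-- A's second (fuzzy) loop
def pvALoop2 (cols : List String) : Option String :=
  match cols with
  | [] => none
  | col :: rest => if pvFuzzy col then some col else pvALoop2 rest

def detect_account_col (cols : List String) : Option String :=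
  match pvALoop1 cols with
  | some col => some col
  | none => pvALoop2 cols

-- ===== PORT B =====
-- single pass: return on exact match, remember the first fuzzy candidate in `fuzzy`
def pvBLoop (cols : List String) (fuzzy : Option String) : Option String :=
  match cols with
  | [] => fuzzy
  | col :: rest =>
    if pvExact col then some col
    else pvBLoop rest (if fuzzy.isNone && pvFuzzy col then some col else fuzzy)

def detect_account_col_alt (cols : List String) : Option String := pvBLoop cols none

-- ===== PRECONDITION & SPEC =====
def Spec_detect_account_col (cols : List String) (out : Option String) : Prop := out = detect_account_col_alt cols
instance (cols : List String) (out : Option String) : Decidable (Spec_detect_account_col cols out) := by unfold Spec_detect_account_col; infer_instance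

-- ===== CLAIM (what is proved, stated in full; the proofs are below) =====
def Claim_equal_detect_account_col : Prop := ∀ (cols : List String), Dom_detect_account_col cols → Spec_detect_account_col cols (detect_account_col cols)

-- ===== LEMMAS AND PROOFS =====
-- loop invariant: B's pass equals A's exact scan, falling back to the remembered fuzzy, then A's fuzzy scan
theorem pvBLoop_eq (cols : List String) (acc : Option String) :
    pvBLoop cols acc =
      match pvALoop1 cols with
      | some c => some c
      | none => match acc with
                | some f => some f
                | none => pvALoop2 cols := by
  induction cols generalizing acc with
  | nil => cases acc <;> simp [pvBLoop, pvALoop1, pvALoop2]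
  | cons col rest ih =>
    by_cases he : pvExact col
    · simp [pvBLoop, pvALoop1, he]
    · cases acc with
      | some f => simp [pvBLoop, pvALoop1, he, ih]
      | none =>
        by_cases hf : pvFuzzy col <;>
          simp [pvBLoop, pvALoop1, pvALoop2, he, hf, ih]

-- ===== VERDICT (by name: the statement is the Claim_ definition above) =====
theorem detect_account_col_spec : Claim_equal_detect_account_col := by
  intro cols _
  unfold Spec_detect_account_col detect_account_col detect_account_col_alt
  rw [pvBLoop_eq]
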